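-- pv_equiv track=rewrite | github.com/globalarray/inf-ege | 20_05_2025/number14_statgrad.py | from40
-- ===== SOURCE A (Python) =====
-- digits = "qwertyuiopasdfghjklzxcvbnm,./+-)(*&^%"
--
-- def from40(n):
--     r = 0
--
--     for idx, c in enumerate(str(n)[::-1]):
--         if not c.isdigit():
--             v = digits.index(c) + 10
--         else:
--             v = int(c)
--         r += v * (40 ** idx)
--     return r
-- ===== SOURCE B (Python) =====
-- digits = "qwertyuiopasdfghjklzxcvbnm,./+-)(*&^%"
--
-- def from40(n):
--     r = 0
--     for c in str(n):
--         r = r * 40 + (int(c) if c.isdigit() else digits.index(c) + 10)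
--     return r
-- ===== Notes on version B (the rewrite author's own statement) =====
-- stated objective: faster
-- what changed: Horner's method over the string left-to-right with a single running accumulator r = r*40 + v, eliminating the string reversal, enumerate and the per-position big-int 40**idx power recomputation.
import Mathlib
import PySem

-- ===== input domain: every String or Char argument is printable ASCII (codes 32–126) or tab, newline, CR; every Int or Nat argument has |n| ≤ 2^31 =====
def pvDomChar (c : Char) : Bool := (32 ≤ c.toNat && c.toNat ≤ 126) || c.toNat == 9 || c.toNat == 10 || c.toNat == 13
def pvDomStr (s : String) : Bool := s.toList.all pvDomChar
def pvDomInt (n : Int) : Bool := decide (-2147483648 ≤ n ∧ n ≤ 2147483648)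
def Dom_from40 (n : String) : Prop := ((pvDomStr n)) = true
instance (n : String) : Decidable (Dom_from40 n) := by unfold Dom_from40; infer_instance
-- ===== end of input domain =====

-- B replaces A's reversed enumerate + 40**idx sum by a left-to-right Horner accumulator (simpler, same per-char valuation).

-- ===== PORT A =====
def pvDigits : List Char := "qwertyuiopasdfghjklzxcvbnm,./+-)(*&^%".toList

-- per-character value, A's branch order: if not c.isdigit(): digits.index(c)+10 else int(c)
-- int(c) on a single char = PySem.Int.ofChars? [c]; digits.index raises on a miss (excluded by Pre_), ported with getD 0
def pvValA (c : Char) : Int :=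
  if !(PySem.Chars.isdigit c) then ((PySem.List.index? pvDigits c).getD 0 : Int) + 10
  else (PySem.Int.ofChars? [c]).getD 0

def from40 (n : String) : Int :=
  -- str(n)[::-1] on a String argument = n.toList.reverse (exact); 40 ** idx with idx = enumerate index ≥ 0
  (PySem.List.enumerate n.toList.reverse).foldl
    (fun r p => r + pvValA p.2 * 40 ^ p.1.toNat) 0

-- ===== PORT B =====
-- per-character value, B's branch order: int(c) if c.isdigit() else digits.index(c)+10
def pvValB (c : Char) : Int :=
  if PySem.Chars.isdigit c then (PySem.Int.ofChars? [c]).getD 0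
  else ((PySem.List.index? pvDigits c).getD 0 : Int) + 10

def from40_alt (n : String) : Int :=
  n.toList.foldl (fun r c => r * 40 + pvValB c) 0

-- ===== PRECONDITION & SPEC =====
-- Pre_: every character is an ASCII digit or occurs in the digits alphabet; elsewhere both
-- Pythons raise ValueError at digits.index(c).
def Pre_from40 (n : String) : Prop :=
  (n.toList.all (fun c => PySem.Chars.isdigit c || pvDigits.contains c)) = true
instance (n : String) : Decidable (Pre_from40 n) := by unfold Pre_from40; infer_instance
def pvWitness_from40 : String := "q7"
def Spec_from40 (n : String) (out : Int) : Prop := out = from40_alt n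
instance (n : String) (out : Int) : Decidable (Spec_from40 n out) := by unfold Spec_from40; infer_instance

-- ===== CLAIM (what is proved, stated in full; the proofs are below) =====
def Claim_equal_from40 : Prop := ∀ (n : String), Dom_from40 n → Pre_from40 n → Spec_from40 n (from40 n)

-- ===== LEMMAS AND PROOFS =====
-- little-endian base-40 value of a character list
def pvW : List Char → Int
  | [] => 0
  | c :: cs => pvValA c + 40 * pvW cs

theorem pvValB_eq (c : Char) : pvValB c = pvValA c := by
  cases h : PySem.Chars.isdigit c <;> simp [pvValA, pvValB, h]

theorem pvEnumFold (m : List Char) : ∀ (s : Int) (r : Int), 0 ≤ s →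
    (PySem.List.enumerate m s).foldl (fun r p => r + pvValA p.2 * 40 ^ p.1.toNat) r
      = r + 40 ^ s.toNat * pvW m := by
  induction m with
  | nil => intro s r _; simp [PySem.List.enumerate_nil, pvW]
  | cons c cs ih =>
    intro s r hs
    rw [PySem.List.enumerate_cons, List.foldl_cons, ih (s + 1) _ (by omega)]
    have h1 : (s + 1).toNat = s.toNat + 1 := by omega
    rw [h1, pvW]
    ring

theorem pvW_append (m : List Char) (c : Char) :
    pvW (m ++ [c]) = pvW m + 40 ^ m.length * pvValA c := by
  induction m with
  | nil => simp [pvW]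
  | cons d ds ih => simp [pvW, ih]; ring

theorem pvHorner (l : List Char) : ∀ (r : Int),
    l.foldl (fun r c => r * 40 + pvValB c) r = r * 40 ^ l.length + pvW l.reverse := by
  induction l with
  | nil => intro r; simp [pvW]
  | cons c cs ih =>
    intro r
    rw [List.foldl_cons, ih, List.reverse_cons, pvW_append]
    simp [pvValB_eq, pow_succ]
    ring

-- ===== VERDICT (by name: the statement is the Claim_ definition above) =====
theorem from40_spec : Claim_equal_from40 := by
  intro n _ _
  unfold Spec_from40 from40 from40_alt
  rw [pvEnumFold _ 0 0 le_rfl, pvHorner]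
  simp
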